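-- pv_equiv track=rewrite | github.com/frank1beans/Taboolo-nuxt | services/importer/logic/price_analysis.py | resolve_item_wbs6_by_code
-- ===== SOURCE A (Python) =====
-- from typing import List, Dict, Optional, Any, Tuple
--
-- def resolve_item_wbs6_by_code(
--
--     item: Dict,
--     wbs6_mapping: Dict[str, Dict]
-- ) -> Optional[str]:
--     """
--     Resolve WBS06 code for an item.
--     Matches by node_id being in any of the mapped node_ids.
--     Returns the WBS6 CODE (not ID).
--     """
--     wbs_ids = item.get("wbs_ids", [])
--     for wbs_id in wbs_ids:
--         wbs_id_str = str(wbs_id)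
--         for code, info in wbs6_mapping.items():
--             if wbs_id_str in info.get("node_ids", []):
--                 return code
--     return None
-- ===== SOURCE B (Python) =====
-- def resolve_item_wbs6_by_code(item, wbs6_mapping):
--     # Build a node_id -> code index once (first mapping code wins), then one lookup per wbs_id.
--     index = {}
--     for code, info in wbs6_mapping.items():
--         for nid in info.get("node_ids", []):
--             if nid not in index:
--                 index[nid] = code
--     for wbs_id in item.get("wbs_ids", []):
--         code = index.get(str(wbs_id))
--         if code is not None:
--             return code
--     return None
-- ===== Notes on version B (the rewrite author's own statement) =====
-- stated objective: alternative
-- what changed: B precomputes a node_id->code dict index (first code wins) in one pass over the mapping and then resolves each wbs_id by a single dict lookup, instead of A's rescan of the whole mapping and all node_id lists for every wbs_id.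
import Mathlib
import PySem

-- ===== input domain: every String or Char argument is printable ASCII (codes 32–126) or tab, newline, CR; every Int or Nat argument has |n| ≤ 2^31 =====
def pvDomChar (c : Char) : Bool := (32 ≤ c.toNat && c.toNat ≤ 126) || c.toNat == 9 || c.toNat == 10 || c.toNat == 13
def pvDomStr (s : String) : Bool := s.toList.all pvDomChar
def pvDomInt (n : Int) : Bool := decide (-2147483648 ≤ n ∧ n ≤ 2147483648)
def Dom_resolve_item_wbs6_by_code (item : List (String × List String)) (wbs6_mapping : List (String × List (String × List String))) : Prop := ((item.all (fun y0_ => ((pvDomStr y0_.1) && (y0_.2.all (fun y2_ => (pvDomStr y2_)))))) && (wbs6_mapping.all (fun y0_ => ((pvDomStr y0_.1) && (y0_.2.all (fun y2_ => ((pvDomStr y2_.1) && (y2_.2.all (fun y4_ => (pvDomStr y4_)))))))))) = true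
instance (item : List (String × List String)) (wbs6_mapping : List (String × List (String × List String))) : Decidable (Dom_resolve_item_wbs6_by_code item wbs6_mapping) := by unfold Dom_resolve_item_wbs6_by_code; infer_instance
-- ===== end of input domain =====

-- B builds a node_id -> code index once (first mapping code wins) and resolves each wbs_id by
-- one dict lookup, instead of rescanning the whole mapping per wbs_id; objective: alternative.

-- ===== PORT A =====
-- inner 'for code, info in wbs6_mapping.items(): if wbs_id_str in info.get("node_ids", []): return code'
def pvAInner (wbs_id : String) : List (String × List (String × List String)) → Option String
  | [] => none
  | (code, info) :: rest =>
    if ((PySem.Dict.mk info).getD "node_ids" []).contains wbs_id then some code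
    else pvAInner wbs_id rest

-- outer 'for wbs_id in wbs_ids: …'
def pvALoop (wbs6_mapping : List (String × List (String × List String))) : List String → Option String
  | [] => none
  | w :: ws =>
    match pvAInner w wbs6_mapping with
    | some c => some c
    | none => pvALoop wbs6_mapping ws

def resolve_item_wbs6_by_code (item : List (String × List String)) (wbs6_mapping : List (String × List (String × List String))) : Option String :=
  pvALoop wbs6_mapping ((PySem.Dict.mk item).getD "wbs_ids" [])

-- ===== PORT B =====
-- 'for code, info in …: for nid in info.get("node_ids", []): if nid not in index: index[nid] = code'
def pvBIndex (wbs6_mapping : List (String × List (String × List String))) : PySem.Dict String String :=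
  wbs6_mapping.foldl
    (fun idx ci =>
      ((PySem.Dict.mk ci.2).getD "node_ids" []).foldl
        (fun idx nid => if idx.contains nid then idx else idx.insert nid ci.1) idx)
    PySem.Dict.empty

-- 'for wbs_id in item.get("wbs_ids", []): code = index.get(str(wbs_id)); if code is not None: return code'
def pvBLoop (idx : PySem.Dict String String) : List String → Option String
  | [] => none
  | w :: ws =>
    match idx.get? w with
    | some c => some c
    | none => pvBLoop idx ws

def resolve_item_wbs6_by_code_alt (item : List (String × List String)) (wbs6_mapping : List (String × List (String × List String))) : Option String :=
  pvBLoop (pvBIndex wbs6_mapping) ((PySem.Dict.mk item).getD "wbs_ids" [])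

-- ===== PRECONDITION & SPEC =====
def Spec_resolve_item_wbs6_by_code (item : List (String × List String)) (wbs6_mapping : List (String × List (String × List String))) (out : Option String) : Prop := out = resolve_item_wbs6_by_code_alt item wbs6_mapping
instance (item : List (String × List String)) (wbs6_mapping : List (String × List (String × List String))) (out : Option String) : Decidable (Spec_resolve_item_wbs6_by_code item wbs6_mapping out) := by unfold Spec_resolve_item_wbs6_by_code; infer_instance

-- ===== CLAIM (what is proved, stated in full; the proofs are below) =====
def Claim_equal_resolve_item_wbs6_by_code : Prop := ∀ (item : List (String × List String)) (wbs6_mapping : List (String × List (String × List String))), Dom_resolve_item_wbs6_by_code item wbs6_mapping → Spec_resolve_item_wbs6_by_code item wbs6_mapping (resolve_item_wbs6_by_code item wbs6_mapping)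

-- ===== LEMMAS AND PROOFS =====

-- one 'setdefault' pass over a node_ids list, seen through get?
lemma pvBIndex_nodes_get (code : String) (w : String) (nodes : List String) (idx : PySem.Dict String String) :
    (nodes.foldl (fun idx nid => if idx.contains nid then idx else idx.insert nid code) idx).get? w =
      match idx.get? w with
      | some c => some c
      | none => if nodes.contains w then some code else none := by
  induction nodes generalizing idx with
  | nil => rcases h : idx.get? w with _ | c <;> simp [h]
  | cons n rest ih =>
    simp only [List.foldl_cons, ih]
    by_cases hc : idx.contains n = true
    · simp [hc]
      rcases h : idx.get? w with _ | c
      · have hne : w ≠ n := by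
          intro he; subst he
          rw [PySem.Dict.contains_eq_isSome_get?, h] at hc; simp at hc
        simp [hne]
      · rfl
    · simp [hc]
      rw [PySem.Dict.get?_insert]
      by_cases hw : w = n
      · subst hw
        have : idx.get? w = none := by
          rw [PySem.Dict.contains_eq_isSome_get?] at hc
          cases h : idx.get? w <;> simp [h] at hc ⊢
        simp [this]
      · rcases h : idx.get? w with _ | c
        · simp [hw]
        · simp [hw]

-- the whole index agrees with A's inner scan
lemma pvBIndex_get (w : String) (m : List (String × List (String × List String))) (idx : PySem.Dict String String) :
    (m.foldl (fun idx ci =>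
        ((PySem.Dict.mk ci.2).getD "node_ids" []).foldl
          (fun idx nid => if idx.contains nid then idx else idx.insert nid ci.1) idx) idx).get? w =
      match idx.get? w with
      | some c => some c
      | none => pvAInner w m := by
  induction m generalizing idx with
  | nil => rcases h : idx.get? w with _ | c <;> simp [h, pvAInner]
  | cons ci rest ih =>
    simp only [List.foldl_cons, ih, pvBIndex_nodes_get]
    rcases idx.get? w with _ | c
    · simp only [pvAInner]
      split_ifs <;> simp
    · rfl

lemma pvBIndex_get?_eq (w : String) (m : List (String × List (String × List String))) :
    (pvBIndex m).get? w = pvAInner w m := by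
  unfold pvBIndex
  rw [pvBIndex_get]
  simp [PySem.Dict.get?_empty]

lemma pvBLoop_eq (m : List (String × List (String × List String))) (ws : List String) :
    pvBLoop (pvBIndex m) ws = pvALoop m ws := by
  induction ws with
  | nil => rfl
  | cons w ws ih => simp only [pvBLoop, pvALoop, pvBIndex_get?_eq, ih]

-- ===== VERDICT (by name: the statement is the Claim_ definition above) =====
theorem resolve_item_wbs6_by_code_spec : Claim_equal_resolve_item_wbs6_by_code := by
  intro item m _
  show _ = _
  unfold resolve_item_wbs6_by_code resolve_item_wbs6_by_code_alt
  rw [pvBLoop_eq]
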